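-- pv_equiv track=rewrite | github.com/nickchen111/Leetcode | Data_Structure/3755. Find Maximum Balanced XOR Subarray Length.py | maxBalancedSubarray
-- ===== SOURCE A (Python) =====
-- from typing import List
--
-- def maxBalancedSubarray(nums: List[int]) -> int:
--     '''
--     目前odd, even 組合 對應到的 xor 是多少 出現位置 <(x, y), mp<xor, int>>
--     '''
--     mp = {}
--     mp[(0,0)] = -1
--     odd = even = ans = 0
--     xor_sum = 0
--     for i, x in enumerate(nums):
--         if x % 2:
--             odd += 1
--         else:
--             even += 1
--         xor_sum ^= x
--         diff = odd - even
--         if (diff, xor_sum) in mp: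
--             ans = max(ans, i - mp[(diff, xor_sum)])
--             continue
--
--         mp[(diff, xor_sum)] = i
--     return ans
-- ===== SOURCE B (Python) =====
-- from typing import List
--
-- def maxBalancedSubarray(nums: List[int]) -> int:
--     n = len(nums)
--     ans = 0
--     for l in range(n):
--         diff = 0
--         x = 0
--         for r in range(l, n):
--             v = nums[r]
--             if v % 2:
--                 diff += 1
--             else:
--                 diff -= 1
--             x ^= v
--             if diff == 0 and x == 0:
--                 ans = max(ans, r - l + 1)
--     return ans
-- ===== Notes on version B (the rewrite author's own statement) =====
-- stated objective: simpler
-- what changed: Replaces the prefix-state hashmap of first occurrences by a direct brute-force scan over all start indices, maintaining a running odd-even difference and running XOR for each start; no dictionary at all.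
import Mathlib
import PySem

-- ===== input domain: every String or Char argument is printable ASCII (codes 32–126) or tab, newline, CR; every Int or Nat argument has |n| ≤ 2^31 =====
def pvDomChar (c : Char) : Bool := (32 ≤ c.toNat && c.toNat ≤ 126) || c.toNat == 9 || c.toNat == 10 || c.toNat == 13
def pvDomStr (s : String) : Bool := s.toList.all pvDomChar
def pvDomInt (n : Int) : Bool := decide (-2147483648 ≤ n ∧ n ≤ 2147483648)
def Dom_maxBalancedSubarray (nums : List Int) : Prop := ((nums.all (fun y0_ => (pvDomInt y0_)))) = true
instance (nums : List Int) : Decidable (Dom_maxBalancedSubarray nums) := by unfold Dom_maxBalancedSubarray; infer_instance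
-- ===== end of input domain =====

-- B replaces A's first-occurrence hashmap of prefix (odd-even, xor) states by a plain
-- brute-force scan over all start indices (no dictionary); objective: simpler, not faster.

-- ===== PORT A =====
-- loop body of A's single for-loop over enumerate(nums); state = (mp, odd, even, ans, xor_sum)
def pvLoopA (acc : PySem.Dict (Int × Int) Int × Int × Int × Int × Int) (p : Int × Int) :
    PySem.Dict (Int × Int) Int × Int × Int × Int × Int :=
  let mp := acc.1
  let odd := acc.2.1
  let even := acc.2.2.1
  let ans := acc.2.2.2.1
  let xor_sum := acc.2.2.2.2
  let i := p.1
  let x := p.2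
  let odd' := if PySem.Int.mod x 2 ≠ 0 then odd + 1 else odd
  let even' := if PySem.Int.mod x 2 ≠ 0 then even else even + 1
  let xor_sum' := PySem.Int.bxor xor_sum x
  let diff := odd' - even'
  match mp.get? (diff, xor_sum') with
  | some m => (mp, odd', even', max ans (i - m), xor_sum')
  | none => (mp.insert (diff, xor_sum') i, odd', even', ans, xor_sum')

def maxBalancedSubarray (nums : List Int) : Int :=
  let mp : PySem.Dict (Int × Int) Int := PySem.Dict.empty.insert (0, 0) (-1)
  ((PySem.List.enumerate nums).foldl pvLoopA (mp, 0, 0, 0, 0)).2.2.2.1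

-- ===== PORT B =====
-- inner loop of B at a fixed start: walks the suffix, len = r - l + 1
def pvAltInner : List Int → Int → Int → Int → Int → Int
  | [], _, _, _, ans => ans
  | v :: rest, len, diff, x, ans =>
      let diff' := if PySem.Int.mod v 2 ≠ 0 then diff + 1 else diff - 1
      let x' := PySem.Int.bxor x v
      let ans' := if diff' = 0 ∧ x' = 0 then max ans len else ans
      pvAltInner rest (len + 1) diff' x' ans'

-- outer loop of B: one inner scan per start index
def pvAltOuter : List Int → Int → Int
  | [], ans => ans
  | v :: rest, ans => pvAltOuter rest (pvAltInner (v :: rest) 1 0 0 ans)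

def maxBalancedSubarray_alt (nums : List Int) : Int := pvAltOuter nums 0

-- ===== PRECONDITION & SPEC =====
def Spec_maxBalancedSubarray (nums : List Int) (out : Int) : Prop := out = maxBalancedSubarray_alt nums
instance (nums : List Int) (out : Int) : Decidable (Spec_maxBalancedSubarray nums out) := by unfold Spec_maxBalancedSubarray; infer_instance

-- ===== CLAIM (what is proved, stated in full; the proofs are below) =====
def Claim_equal_maxBalancedSubarray : Prop := ∀ (nums : List Int), Dom_maxBalancedSubarray nums → Spec_maxBalancedSubarray nums (maxBalancedSubarray nums)

-- ===== LEMMAS AND PROOFS =====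

-- the common prefix-state step: odd-even difference and running xor
def pvStep (s : Int × Int) (v : Int) : Int × Int :=
  ((if PySem.Int.mod v 2 ≠ 0 then s.1 + 1 else s.1 - 1), PySem.Int.bxor s.2 v)

-- state after the first k elements
def pvS (nums : List Int) (k : Nat) : Int × Int := (nums.take k).foldl pvStep (0, 0)

-- "v is the answer": 0 ≤ v, v bounds every balanced span, and v is 0 or realized by one
def pvIsMax (nums : List Int) (v : Int) : Prop :=
  0 ≤ v ∧
  (∀ k j : Nat, k < j → j ≤ nums.length → pvS nums j = pvS nums k → (j : Int) - (k : Int) ≤ v) ∧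
  (v = 0 ∨ ∃ k j : Nat, k < j ∧ j ≤ nums.length ∧ pvS nums j = pvS nums k ∧ v = (j : Int) - (k : Int))

theorem pvIsMax_unique {nums : List Int} {v w : Int}
    (hv : pvIsMax nums v) (hw : pvIsMax nums w) : v = w := by
  obtain ⟨hv0, hvb, hvw⟩ := hv
  obtain ⟨hw0, hwb, hww⟩ := hw
  have h1 : v ≤ w := by
    rcases hvw with h | ⟨k, j, hkj, hjn, hs, he⟩
    · omega
    · have := hwb k j hkj hjn hs; omega
  have h2 : w ≤ v := by
    rcases hww with h | ⟨k, j, hkj, hjn, hs, he⟩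
    · omega
    · have := hvb k j hkj hjn hs; omega
  omega

-- ---- xor algebra for PySem.Int.bxor ----
def pvDec (s : Bool) (m : Nat) : Int := if s then -(m : Int) - 1 else (m : Int)

theorem pvDec_eq (a : Int) : pvDec (decide (a < 0)) (if 0 ≤ a then a.toNat else (-a - 1).toNat) = a := by
  unfold pvDec; split_ifs <;> simp_all <;> omega

theorem bxor_dec (s t : Bool) (m n : Nat) :
    PySem.Int.bxor (pvDec s m) (pvDec t n) = pvDec (xor s t) (m ^^^ n) := by
  have h2 : ∀ k : Nat, (-(-(k : Int) - 1) - 1).toNat = k := by intro k; omega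
  have h3 : ∀ k : Nat, ¬ (1 ≤ -(k : Int)) := by intro k; omega
  cases s <;> cases t <;>
    simp only [pvDec, Bool.xor_false, Bool.xor_true, if_true, PySem.Int.bxor, Bool.xor_self] <;>
    simp [h3, Int.toNat_natCast]

theorem bxor_assoc (a b c : Int) :
    PySem.Int.bxor (PySem.Int.bxor a b) c = PySem.Int.bxor a (PySem.Int.bxor b c) := by
  rw [← pvDec_eq a, ← pvDec_eq b, ← pvDec_eq c]
  rw [bxor_dec, bxor_dec, bxor_dec, bxor_dec]
  rw [Bool.xor_assoc, Nat.xor_assoc]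

theorem bxor_eq_self_iff (a b : Int) : PySem.Int.bxor a b = a ↔ b = 0 := by
  constructor
  · intro h
    have h2 : PySem.Int.bxor a (PySem.Int.bxor a b) = PySem.Int.bxor a a := by rw [h]
    rw [← bxor_assoc, PySem.Int.bxor_self] at h2
    rw [PySem.Int.bxor_comm, PySem.Int.bxor_zero] at h2
    simpa [PySem.Int.bxor_self] using h2
  · rintro rfl; exact PySem.Int.bxor_zero a

-- ---- composing prefix states ----
def pvComb (c s : Int × Int) : Int × Int := (c.1 + s.1, PySem.Int.bxor c.2 s.2)

theorem pvStep_comb (c s : Int × Int) (v : Int) :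
    pvStep (pvComb c s) v = pvComb c (pvStep s v) := by
  unfold pvStep pvComb
  split_ifs <;> simp [Prod.ext_iff, bxor_assoc] <;> ring

theorem foldl_comb (seg : List Int) (c s : Int × Int) :
    seg.foldl pvStep (pvComb c s) = pvComb c (seg.foldl pvStep s) := by
  induction seg generalizing s with
  | nil => rfl
  | cons v rest ih => simp [List.foldl, pvStep_comb, ih]

theorem foldl_from (seg : List Int) (c : Int × Int) :
    seg.foldl pvStep c = pvComb c (seg.foldl pvStep (0, 0)) := by
  have : pvComb c (0, 0) = c := by simp [pvComb, PySem.Int.bxor_zero]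
  rw [← this, foldl_comb, this]

theorem comb_eq_self_iff (c s : Int × Int) : pvComb c s = c ↔ s = (0, 0) := by
  constructor
  · intro h
    have h1 : c.1 + s.1 = c.1 := congrArg Prod.fst h
    have h2 : PySem.Int.bxor c.2 s.2 = c.2 := congrArg Prod.snd h
    have h3 := (bxor_eq_self_iff c.2 s.2).1 h2
    obtain ⟨a, b⟩ := s
    simp only at h1 h3
    refine Prod.ext (by simp; omega) (by simpa using h3)
  · rintro rfl; simp [pvComb, PySem.Int.bxor_zero]

theorem pvS_add (nums : List Int) (l t : Nat) :
    pvS nums (l + t) = pvComb (pvS nums l) (((nums.drop l).take t).foldl pvStep (0, 0)) := by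
  unfold pvS
  rw [List.take_add, List.foldl_append, foldl_from]

theorem seg_zero_iff (nums : List Int) (l t : Nat) :
    ((nums.drop l).take t).foldl pvStep (0, 0) = (0, 0) ↔ pvS nums (l + t) = pvS nums l := by
  rw [pvS_add]
  exact (comb_eq_self_iff _ _).symm

theorem pvS_succ {nums : List Int} {i : Nat} {v : Int} {rest : List Int}
    (h : nums.drop i = v :: rest) : pvS nums (i + 1) = pvStep (pvS nums i) v := by
  have h1 := pvS_add nums i 1
  rw [h] at h1
  simp only [List.take_succ_cons, List.take_zero, List.foldl_cons, List.foldl_nil] at h1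
  rw [h1, ← pvStep_comb]
  simp [pvComb, PySem.Int.bxor_zero]

-- ---- B's loops realize pvIsMax ----
theorem inner_spec (xs : List Int) :
    ∀ (d x ans len : Int),
      ans ≤ pvAltInner xs len d x ans ∧
      (∀ t : Nat, 1 ≤ t → t ≤ xs.length → (xs.take t).foldl pvStep (d, x) = (0, 0) →
        len + t - 1 ≤ pvAltInner xs len d x ans) ∧
      (pvAltInner xs len d x ans = ans ∨
        ∃ t : Nat, 1 ≤ t ∧ t ≤ xs.length ∧ (xs.take t).foldl pvStep (d, x) = (0, 0) ∧
          pvAltInner xs len d x ans = len + t - 1) := by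
  induction xs with
  | nil =>
    intro d x ans len
    refine ⟨le_rfl, ?_, Or.inl rfl⟩
    intro t ht1 ht2 _
    simp at ht2
    omega
  | cons v rest ih =>
    intro d x ans len
    set d' := if PySem.Int.mod v 2 ≠ 0 then d + 1 else d - 1 with hd'
    set x' := PySem.Int.bxor x v with hx'
    set ans' := if d' = 0 ∧ x' = 0 then max ans len else ans with hans'
    have hsv : pvStep (d, x) v = (d', x') := rfl
    have hstep : pvAltInner (v :: rest) len d x ans = pvAltInner rest (len + 1) d' x' ans' := rfl
    obtain ⟨ihle, ihbd, ihw⟩ := ih d' x' ans' (len + 1)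
    have hles : ans ≤ ans' := by
      rw [hans']; split_ifs
      · exact le_max_left _ _
      · exact le_rfl
    rw [hstep]
    refine ⟨le_trans hles ihle, ?_, ?_⟩
    · intro t ht1 htl hfold
      obtain ⟨t, rfl⟩ : ∃ t', t = t' + 1 := ⟨t - 1, by omega⟩
      rw [List.take_succ_cons, List.foldl_cons, hsv] at hfold
      rcases Nat.eq_zero_or_pos t with h0 | hpos
      · subst h0
        simp only [List.take_zero, List.foldl_nil, Prod.mk.injEq] at hfold
        have hA : ans' = max ans len := by rw [hans', if_pos hfold]
        have h1 : ans' ≤ pvAltInner rest (len + 1) d' x' ans' := ihle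
        have h2 : len ≤ ans' := by rw [hA]; exact le_max_right _ _
        push_cast
        omega
      · have hb := ihbd t hpos (by simpa using htl) hfold
        push_cast at hb ⊢
        omega
    · rcases ihw with heq | ⟨t, ht1, htl, hfold, heq⟩
      · rw [heq, hans']
        split_ifs with hcond
        · by_cases hml : len ≤ ans
          · left; exact max_eq_left hml
          · right
            refine ⟨1, le_rfl, by simp, ?_, ?_⟩
            · rw [List.take_succ_cons, List.take_zero, List.foldl_cons, hsv, List.foldl_nil]
              exact Prod.ext hcond.1 hcond.2
            · rw [max_eq_right (le_of_not_ge hml)]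
              push_cast
              ring
        · left; rfl
      · right
        refine ⟨t + 1, by omega, by simpa using htl, ?_, ?_⟩
        · rw [List.take_succ_cons, List.foldl_cons, hsv]
          exact hfold
        · rw [heq]; push_cast; ring

theorem outer_spec (c : List Int) :
    ∀ (nums : List Int) (l : Nat) (ans : Int),
      c = nums.drop l → l ≤ nums.length → 0 ≤ ans →
      (∀ k j : Nat, k < j → j ≤ nums.length → k < l → pvS nums j = pvS nums k →
        (j : Int) - (k : Int) ≤ ans) →
      (ans = 0 ∨ ∃ k j : Nat, k < j ∧ j ≤ nums.length ∧ pvS nums j = pvS nums k ∧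
        ans = (j : Int) - (k : Int)) →
      pvIsMax nums (pvAltOuter c ans) := by
  induction c with
  | nil =>
    intro nums l ans hc hl h0 hb hw
    have hlen : nums.length ≤ l := by
      have := congrArg List.length hc
      simp [List.length_drop] at this
      omega
    refine ⟨h0, ?_, hw⟩
    intro k j hkj hjn hm
    exact hb k j hkj hjn (by omega) hm
  | cons v rest ih =>
    intro nums l ans hc hl h0 hb hw
    have hlen : (v :: rest).length = nums.length - l := by
      have := congrArg List.length hc
      simpa [List.length_drop] using this
    have hln : l < nums.length := by simp at hlen; omega
    have hrest : rest = nums.drop (l + 1) := by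
      have h1 : nums.drop (l + 1) = List.drop 1 (nums.drop l) := by
        rw [List.drop_drop]
      rw [h1, ← hc]
      simp
    have hbridge : ∀ t : Nat, ((v :: rest).take t).foldl pvStep (0, 0) = (0, 0) ↔
        pvS nums (l + t) = pvS nums l := by
      intro t
      rw [hc]
      exact seg_zero_iff nums l t
    obtain ⟨ile, ibd, iw⟩ := inner_spec (v :: rest) 0 0 ans 1
    set res1 := pvAltInner (v :: rest) 1 0 0 ans with hres1
    have hout : pvAltOuter (v :: rest) ans = pvAltOuter rest res1 := rfl
    rw [hout]
    apply ih nums (l + 1) res1 hrest (by omega) (le_trans h0 ile)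
    · intro k j hkj hjn hkl1 hm
      by_cases hkl : k < l
      · exact le_trans (hb k j hkj hjn hkl hm) ile
      · have hkeq : k = l := by omega
        subst hkeq
        have ht1 : 1 ≤ j - k := by omega
        have htl : j - k ≤ (v :: rest).length := by simp at hlen ⊢; omega
        have hfold : ((v :: rest).take (j - k)).foldl pvStep (0, 0) = (0, 0) := by
          rw [hbridge]
          have : k + (j - k) = j := by omega
          rw [this]
          exact hm
        have := ibd (j - k) ht1 htl hfold
        have hcast : ((j - k : Nat) : Int) = (j : Int) - (k : Int) := by omega
        omega
    · rcases iw with heq | ⟨t, ht1, htl, hfold, heq⟩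
      · rw [heq]
        exact hw
      · right
        refine ⟨l, l + t, by omega, ?_, (hbridge t).1 hfold, ?_⟩
        · simp at hlen htl ⊢
          omega
        · rw [heq]
          push_cast
          ring

theorem alt_isMax (nums : List Int) : pvIsMax nums (maxBalancedSubarray_alt nums) := by
  unfold maxBalancedSubarray_alt
  exact outer_spec nums nums 0 0 (by simp) (by simp) le_rfl (by omega) (Or.inl rfl)

-- ---- A's loop realizes pvIsMax ----
def pvMpInv (nums : List Int) (i : Nat) (mp : PySem.Dict (Int × Int) Int) : Prop :=
  ∀ σ (m : Int), mp.get? σ = some m ↔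
    ∃ k : Nat, k ≤ i ∧ pvS nums k = σ ∧ (∀ k' : Nat, k' < k → pvS nums k' ≠ σ) ∧ m = (k : Int) - 1

theorem mpinv_extend {nums : List Int} {i : Nat} {mp : PySem.Dict (Int × Int) Int}
    (h : pvMpInv nums i mp) (hex : ∃ k, k ≤ i ∧ pvS nums k = pvS nums (i + 1)) :
    pvMpInv nums (i + 1) mp := by
  intro σ m
  rw [h σ m]
  constructor
  · rintro ⟨k, hk, hs, hmin, hm⟩
    exact ⟨k, by omega, hs, hmin, hm⟩
  · rintro ⟨k, hk, hs, hmin, hm⟩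
    rcases Nat.lt_or_ge k (i + 1) with hlt | hge
    · exact ⟨k, by omega, hs, hmin, hm⟩
    · have hkeq : k = i + 1 := by omega
      subst hkeq
      obtain ⟨k0, hk0, hs0⟩ := hex
      exact absurd (hs0.trans hs) (hmin k0 (by omega))

theorem mpinv_insert {nums : List Int} {i : Nat} {mp : PySem.Dict (Int × Int) Int}
    (h : pvMpInv nums i mp) (hnone : ∀ k, k ≤ i → pvS nums k ≠ pvS nums (i + 1)) :
    pvMpInv nums (i + 1) (mp.insert (pvS nums (i + 1)) (i : Int)) := by
  intro σ m
  rw [PySem.Dict.get?_insert]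
  split_ifs with hσ
  · subst hσ
    constructor
    · intro hsm
      have hmi : m = (i : Int) := by
        have := Option.some.inj hsm
        omega
      exact ⟨i + 1, le_rfl, rfl, fun k' hk' => hnone k' (by omega), by push_cast; omega⟩
    · rintro ⟨k, hk, hs, hmin, hm⟩
      have hkeq : k = i + 1 := by
        by_contra hcon
        exact hnone k (by omega) hs
      subst hkeq
      have : m = (i : Int) := by push_cast at hm; omega
      rw [this]
  · rw [h σ m]
    constructor
    · rintro ⟨k, hk, hs, hmin, hm⟩
      exact ⟨k, by omega, hs, hmin, hm⟩
    · rintro ⟨k, hk, hs, hmin, hm⟩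
      rcases Nat.lt_or_ge k (i + 1) with hlt | hge
      · exact ⟨k, by omega, hs, hmin, hm⟩
      · have hkeq : k = i + 1 := by omega
        subst hkeq
        exact absurd hs.symm hσ

theorem a_loop (c : List Int) :
    ∀ (nums : List Int) (i : Nat) (mp : PySem.Dict (Int × Int) Int) (odd even ans xs : Int),
      c = nums.drop i → i ≤ nums.length →
      odd - even = (pvS nums i).1 → xs = (pvS nums i).2 →
      pvMpInv nums i mp →
      0 ≤ ans →
      (∀ k j : Nat, k < j → j ≤ i → pvS nums j = pvS nums k → (j : Int) - (k : Int) ≤ ans) →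
      (ans = 0 ∨ ∃ k j : Nat, k < j ∧ j ≤ nums.length ∧ pvS nums j = pvS nums k ∧
        ans = (j : Int) - (k : Int)) →
      pvIsMax nums (((PySem.List.enumerate c (i : Int)).foldl pvLoopA (mp, odd, even, ans, xs)).2.2.2.1) := by
  intro nums
  induction c with
  | nil =>
    intro i mp odd even ans xs hc hi hde hxs hmp h0 hb hw
    have hlen : nums.length ≤ i := by
      have := congrArg List.length hc
      simp [List.length_drop] at this
      omega
    simp only [PySem.List.enumerate_nil, List.foldl_nil]
    refine ⟨h0, ?_, hw⟩
    intro k j hkj hjn hm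
    exact hb k j hkj (by omega) hm
  | cons v rest ih =>
    intro i mp odd even ans xs hc hi hde hxs hmp h0 hb hw
    have hlen : (v :: rest).length = nums.length - i := by
      have := congrArg List.length hc
      simpa [List.length_drop] using this
    have hin : i < nums.length := by simp at hlen; omega
    have hrest : rest = nums.drop (i + 1) := by
      have h1 : nums.drop (i + 1) = List.drop 1 (nums.drop i) := by rw [List.drop_drop]
      rw [h1, ← hc]
      simp
    have hstate : pvS nums (i + 1) = pvStep (pvS nums i) v := pvS_succ hc.symm
    have hdiff : (if PySem.Int.mod v 2 ≠ 0 then odd + 1 else odd) -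
        (if PySem.Int.mod v 2 ≠ 0 then even else even + 1) = (pvS nums (i + 1)).1 := by
      rw [hstate]
      unfold pvStep
      split_ifs <;> simp <;> omega
    have hxor : PySem.Int.bxor xs v = (pvS nums (i + 1)).2 := by
      rw [hstate, hxs]
      rfl
    have hkey : ((if PySem.Int.mod v 2 ≠ 0 then odd + 1 else odd) -
        (if PySem.Int.mod v 2 ≠ 0 then even else even + 1), PySem.Int.bxor xs v) = pvS nums (i + 1) := by
      rw [hdiff, hxor]
    rw [PySem.List.enumerate_cons, List.foldl_cons]
    have hicast : (i : Int) + 1 = ((i + 1 : Nat) : Int) := by push_cast; ring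
    rw [hicast]
    cases hget : mp.get? (pvS nums (i + 1)) with
    | some m =>
      have happ : pvLoopA (mp, odd, even, ans, xs) ((i : Int), v) =
          (mp, (if PySem.Int.mod v 2 ≠ 0 then odd + 1 else odd),
            (if PySem.Int.mod v 2 ≠ 0 then even else even + 1),
            max ans ((i : Int) - m), PySem.Int.bxor xs v) := by
        simp only [pvLoopA]
        rw [hkey, hget]
      rw [happ]
      obtain ⟨k, hk, hSk, hmin, hm⟩ := (hmp _ m).1 hget
      apply ih (i + 1) mp _ _ _ _ hrest (by omega) hdiff hxor
      · exact mpinv_extend hmp ⟨k, hk, hSk⟩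
      · exact le_trans h0 (le_max_left _ _)
      · intro k2 j hk2j hji hmatch
        rcases Nat.lt_or_ge j (i + 1) with hj | hj
        · exact le_trans (hb k2 j hk2j (by omega) hmatch) (le_max_left _ _)
        · have hjeq : j = i + 1 := by omega
          subst hjeq
          have hk2k : k ≤ k2 := by
            by_contra hcon
            exact hmin k2 (by omega) hmatch.symm
          have hle := le_max_right ans ((i : Int) - m)
          push_cast at hle ⊢
          omega
      · rcases le_or_gt ((i : Int) - m) ans with hml | hml
        · rw [max_eq_left hml]
          exact hw
        · rw [max_eq_right (le_of_lt hml)]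
          right
          exact ⟨k, i + 1, by omega, by omega, hSk.symm, by push_cast; omega⟩
    | none =>
      have hnone : ∀ k, k ≤ i → pvS nums k ≠ pvS nums (i + 1) := by
        intro k hk hSk
        have hQ : ∃ k', pvS nums k' = pvS nums (i + 1) := ⟨k, hSk⟩
        have hfs := Nat.find_spec hQ
        have hfm : Nat.find hQ ≤ k := Nat.find_min' hQ hSk
        have hsome := (hmp (pvS nums (i + 1)) ((Nat.find hQ : Int) - 1)).2
          ⟨Nat.find hQ, by omega, hfs, fun k' hk' => Nat.find_min hQ hk', rfl⟩
        rw [hget] at hsome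
        simp at hsome
      have happ : pvLoopA (mp, odd, even, ans, xs) ((i : Int), v) =
          (mp.insert (pvS nums (i + 1)) (i : Int),
            (if PySem.Int.mod v 2 ≠ 0 then odd + 1 else odd),
            (if PySem.Int.mod v 2 ≠ 0 then even else even + 1),
            ans, PySem.Int.bxor xs v) := by
        simp only [pvLoopA]
        rw [hkey, hget]
      rw [happ]
      apply ih (i + 1) _ _ _ _ _ hrest (by omega) hdiff hxor
      · exact mpinv_insert hmp hnone
      · exact h0
      · intro k2 j hk2j hji hmatch
        rcases Nat.lt_or_ge j (i + 1) with hj | hj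
        · exact hb k2 j hk2j (by omega) hmatch
        · have hjeq : j = i + 1 := by omega
          subst hjeq
          exact absurd hmatch.symm (hnone k2 (by omega))
      · exact hw

theorem a_isMax (nums : List Int) : pvIsMax nums (maxBalancedSubarray nums) := by
  have hmp0 : pvMpInv nums 0 (PySem.Dict.empty.insert ((0 : Int), (0 : Int)) (-1)) := by
    intro σ m
    rw [PySem.Dict.get?_insert]
    split_ifs with hσ
    · subst hσ
      constructor
      · intro h
        refine ⟨0, le_rfl, rfl, fun k' hk' => absurd hk' (Nat.not_lt_zero k'), ?_⟩
        have := Option.some.inj h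
        omega
      · rintro ⟨k, hk, hs, hmin, hm⟩
        have hk0 : k = 0 := by omega
        subst hk0
        have : m = -1 := by push_cast at hm; omega
        rw [this]
    · rw [PySem.Dict.get?_empty]
      constructor
      · intro h
        simp at h
      · rintro ⟨k, hk, hs, hmin, hm⟩
        have hk0 : k = 0 := by omega
        subst hk0
        exact absurd hs.symm hσ
  have := a_loop nums nums 0 (PySem.Dict.empty.insert ((0 : Int), (0 : Int)) (-1)) 0 0 0 0
    (by simp) (by simp) (by simp [pvS]) (by simp [pvS]) hmp0 le_rfl
    (by intro k j h1 h2 _; omega) (Or.inl rfl)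
  simpa [maxBalancedSubarray] using this

-- ===== VERDICT (by name: the statement is the Claim_ definition above) =====
theorem maxBalancedSubarray_spec : Claim_equal_maxBalancedSubarray := by
  intro nums _
  unfold Spec_maxBalancedSubarray
  exact pvIsMax_unique (a_isMax nums) (alt_isMax nums)
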